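-- pv_equiv track=rewrite | github.com/sunilsoni/interview-notes-python | com/interview/2026/uber/test8.py | longest_n_stable_subarray_length
-- ===== SOURCE A (Python) =====
-- from collections import deque  # We use deque because it supports O(1) pops from both ends.
--
-- def longest_n_stable_subarray_length(arr, n):
--     # Purpose:
--     # Return the length of the longest contiguous subarray such that:
--     # max(subarray) - min(subarray) <= n
--
--     if n < 0:
--         # Reason:
--         # For any non-empty subarray, max-min is always >= 0.
--         # If n is negative, it is impossible to satisfy max-min <= n.
--         return 0
--
--     if not arr:
--         # Reason:
--         # No elements -> no non-empty subarray exists.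
--         # Return 0 by convention for "longest length".
--         return 0
--
--     min_dq = deque()
--     # min_dq stores indices of elements in increasing order of their values.
--     # The front (min_dq[0]) always points to the smallest value in current window.
--
--     max_dq = deque()
--     # max_dq stores indices of elements in decreasing order of their values.
--     # The front (max_dq[0]) always points to the largest value in current window.
--
--     left = 0
--     # left is the start index of the current sliding window.
--
--     best = 0
--     # best stores the maximum valid window length we have seen so far.
--
--     for right in range(len(arr)):
--         # right is the end index of the sliding window.
--         # We expand the window by adding arr[right].
--
--         x = arr[right]
--         # Store current element in x to avoid repeating arr[right] many times.
--
--         # ----------------------------------------------------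
--         # Maintain min_dq (monotonic increasing by value)
--         # ----------------------------------------------------
--         while min_dq and arr[min_dq[-1]] > x:
--             # If the last element in min_dq is bigger than x,
--             # then that last element can NEVER be the minimum anymore
--             # for any window that includes x (because x is smaller and newer).
--             min_dq.pop()
--             # Remove it from consideration to keep deque increasing.
--
--         min_dq.append(right)
--         # Add current index.
--         # It becomes a candidate minimum for current/future windows.
--
--         # ----------------------------------------------------
--         # Maintain max_dq (monotonic decreasing by value)
--         # ----------------------------------------------------
--         while max_dq and arr[max_dq[-1]] < x:
--             # If the last element in max_dq is smaller than x,
--             # then that last element can NEVER be the maximum anymore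
--             # for any window that includes x (because x is bigger and newer).
--             max_dq.pop()
--             # Remove it so deque stays decreasing.
--
--         max_dq.append(right)
--         # Add current index as a candidate maximum.
--
--         # ----------------------------------------------------
--         # Shrink window from left if it violates max-min <= n
--         # ----------------------------------------------------
--         while arr[max_dq[0]] - arr[min_dq[0]] > n:
--             # max is at max_dq[0], min is at min_dq[0].
--             # If max-min > n, the window is invalid (not N-stable).
--             # We must shrink from the left to reduce range.
--
--             if min_dq[0] == left:
--                 # If the minimum element index is exactly the left boundary,
--                 # moving left forward means that minimum leaves the window.
--                 min_dq.popleft()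
--                 # Remove it because it is no longer inside [left..right].
--
--             if max_dq[0] == left:
--                 # Same logic for maximum element leaving window.
--                 max_dq.popleft()
--
--             left += 1
--             # Move left forward by 1 step (shrink window).
--             # We repeat until the window becomes valid.
--
--         # ----------------------------------------------------
--         # Window is valid here, update best
--         # ----------------------------------------------------
--         window_len = right - left + 1
--         # Length formula for inclusive window [left..right].
--
--         if window_len > best:
--             # If current valid window is larger, record it.
--             best = window_len
--
--     return best
-- ===== SOURCE B (Python) =====
-- def longest_n_stable_subarray_length(arr, n):
--     # Brute-force with fixed left endpoint: extend right, track running min/max,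
--     # break as soon as the window's range exceeds n (range is monotone in the window).
--     best = 0
--     for left in range(len(arr)):
--         cur_min = arr[left]
--         cur_max = arr[left]
--         for right in range(left, len(arr)):
--             x = arr[right]
--             if x < cur_min:
--                 cur_min = x
--             if x > cur_max:
--                 cur_max = x
--             if cur_max - cur_min <= n:
--                 if right - left + 1 > best:
--                     best = right - left + 1
--             else:
--                 break
--     return best
-- ===== Notes on version B (the rewrite author's own statement) =====
-- stated objective: alternative
-- what changed: Replaced the deque-based sliding window (monotonic min/max deques plus left-shrinking) by a plain fixed-left double loop that tracks a running min/max and breaks when the range exceeds n.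
import Mathlib
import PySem

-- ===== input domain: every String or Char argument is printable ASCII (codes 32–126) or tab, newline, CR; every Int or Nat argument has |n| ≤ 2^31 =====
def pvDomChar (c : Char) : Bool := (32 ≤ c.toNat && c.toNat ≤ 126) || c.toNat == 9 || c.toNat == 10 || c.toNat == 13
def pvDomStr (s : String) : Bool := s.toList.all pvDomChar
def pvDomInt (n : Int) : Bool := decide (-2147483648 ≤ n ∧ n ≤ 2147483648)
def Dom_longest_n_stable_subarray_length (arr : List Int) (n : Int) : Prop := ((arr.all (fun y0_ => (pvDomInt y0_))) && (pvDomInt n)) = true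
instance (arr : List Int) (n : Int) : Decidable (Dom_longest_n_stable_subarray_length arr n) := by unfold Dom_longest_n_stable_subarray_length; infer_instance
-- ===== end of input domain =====

-- B replaces A's deque-based sliding window by a plain fixed-left double loop with a
-- running min/max and an early break; same result, no speed claim (A is O(n), B is O(n^2)).

-- ===== PORT A =====
-- `while dq and arr[dq[-1]] > x: dq.pop()` — pop from the right end while the predicate holds
def pvPopRightWhile (p : Nat → Bool) : List Nat → List Nat
  | [] => []
  | a :: t =>
    match pvPopRightWhile p t with
    | [] => if p a then [] else [a]
    | b :: u => a :: b :: u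

-- the `while arr[max_dq[0]] - arr[min_dq[0]] > n:` shrink loop; `fuel` only makes the
-- recursion total (the Python loop runs at most `right` times, fuel = right+1 is never
-- exhausted in a real execution); `headD 0` is a totality guard for the (unreachable in
-- real executions) empty-deque state where Python would raise IndexError
def pvShrink (arr : List Int) (n : Int) : Nat → List Nat → List Nat → Nat → List Nat × List Nat × Nat
  | 0, minDq, maxDq, left => (minDq, maxDq, left)
  | fuel + 1, minDq, maxDq, left =>
    if arr.getD (maxDq.headD 0) 0 - arr.getD (minDq.headD 0) 0 > n then
      pvShrink arr n fuel (if minDq.head? = some left then minDq.tail else minDq)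
        (if maxDq.head? = some left then maxDq.tail else maxDq) (left + 1)
    else (minDq, maxDq, left)

-- one iteration of `for right in range(len(arr))`
def pvStepA (arr : List Int) (n : Int) : List Nat × List Nat × Nat × Int → Nat → List Nat × List Nat × Nat × Int
  | (minDq, maxDq, left, best), right =>
    let x := arr.getD right 0
    let minDq1 := pvPopRightWhile (fun i => decide (arr.getD i 0 > x)) minDq ++ [right]
    let maxDq1 := pvPopRightWhile (fun i => decide (arr.getD i 0 < x)) maxDq ++ [right]
    match pvShrink arr n (right + 1) minDq1 maxDq1 left with
    | (minDq2, maxDq2, left2) =>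
      let windowLen : Int := (right : Int) - (left2 : Int) + 1
      (minDq2, maxDq2, left2, if windowLen > best then windowLen else best)

def longest_n_stable_subarray_length (arr : List Int) (n : Int) : Int :=
  if n < 0 then 0
  else if arr = [] then 0
  else ((List.range arr.length).foldl (pvStepA arr n) ([], [], 0, 0)).2.2.2

-- ===== PORT B =====
-- inner `for right in range(left, len(arr))` loop with break
def pvInnerB (arr : List Int) (n : Int) (left : Nat) : Nat → Int → Int → Int → Int
  | right, curMin, curMax, best =>
    if h : right < arr.length then
      let x := arr.getD right 0
      let curMin' := if x < curMin then x else curMin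
      let curMax' := if x > curMax then x else curMax
      if curMax' - curMin' ≤ n then
        pvInnerB arr n left (right + 1) curMin' curMax'
          (if (right : Int) - (left : Int) + 1 > best then (right : Int) - (left : Int) + 1 else best)
      else best
    else best
  termination_by right => arr.length - right
  decreasing_by omega

def longest_n_stable_subarray_length_alt (arr : List Int) (n : Int) : Int :=
  (List.range arr.length).foldl
    (fun best left => pvInnerB arr n left left (arr.getD left 0) (arr.getD left 0) best) 0

-- ===== PRECONDITION & SPEC =====
def Spec_longest_n_stable_subarray_length (arr : List Int) (n : Int) (out : Int) : Prop := out = longest_n_stable_subarray_length_alt arr n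
instance (arr : List Int) (n : Int) (out : Int) : Decidable (Spec_longest_n_stable_subarray_length arr n out) := by unfold Spec_longest_n_stable_subarray_length; infer_instance

-- ===== CLAIM (what is proved, stated in full; the proofs are below) =====
def Claim_equal_longest_n_stable_subarray_length : Prop := ∀ (arr : List Int) (n : Int), Dom_longest_n_stable_subarray_length arr n → Spec_longest_n_stable_subarray_length arr n (longest_n_stable_subarray_length arr n)

-- ===== LEMMAS AND PROOFS =====

-- `pvValid arr n l r` = the window arr[l..r] (inclusive) has max - min ≤ n
def pvValid (arr : List Int) (n : Int) (l r : Nat) : Prop :=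
  ∀ i j : Nat, l ≤ i → i ≤ r → l ≤ j → j ≤ r → arr.getD i 0 - arr.getD j 0 ≤ n

def pvValidB (arr : List Int) (n : Int) (l r : Nat) : Bool :=
  (List.range (r + 1)).all fun i => (List.range (r + 1)).all fun j =>
    decide (l ≤ i → l ≤ j → arr.getD i 0 - arr.getD j 0 ≤ n)

lemma pvValidB_iff (arr : List Int) (n : Int) (l r : Nat) :
    pvValidB arr n l r = true ↔ pvValid arr n l r := by
  simp only [pvValidB, pvValid, List.all_eq_true, List.mem_range, decide_eq_true_eq]
  constructor
  · intro h i j hi hir hj hjr; exact h i (by omega) j (by omega) hi hj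
  · intro h i hi j hj hli hlj; exact h i j hli (by omega) hlj (by omega)

lemma pvValid_top (arr : List Int) (n : Int) (r : Nat) : pvValidB arr n (r + 1) r = true := by
  simp only [pvValidB, List.all_eq_true, List.mem_range, decide_eq_true_eq]
  intro i hi j hj h1 h2; omega

lemma pvValid_ex (arr : List Int) (n : Int) (r : Nat) : ∃ l, pvValidB arr n l r = true :=
  ⟨r + 1, pvValid_top arr n r⟩

-- least left endpoint l with window [l..r] valid (l = r+1 is vacuously valid)
def pvMinL (arr : List Int) (n : Int) (r : Nat) : Nat :=
  Nat.find (pvValid_ex arr n r)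

lemma pvMinL_valid (arr : List Int) (n : Int) (r : Nat) : pvValid arr n (pvMinL arr n r) r := by
  unfold pvMinL; exact (pvValidB_iff _ _ _ _).1 (Nat.find_spec (pvValid_ex arr n r))

lemma pvMinL_le (arr : List Int) (n : Int) {l r : Nat} (h : pvValid arr n l r) :
    pvMinL arr n r ≤ l := by
  unfold pvMinL; exact Nat.find_le ((pvValidB_iff _ _ _ _).2 h)

lemma pvValid_self (arr : List Int) {n : Int} (hn : 0 ≤ n) (r : Nat) : pvValid arr n r r := by
  intro i j hi hir hj hjr
  have h1 : i = r := by omega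
  have h2 : j = r := by omega
  subst h1; subst h2; omega

lemma pvValid_sub_right (arr : List Int) (n : Int) {l r r' : Nat} (h : pvValid arr n l r)
    (hr : r' ≤ r) : pvValid arr n l r' :=
  fun i j hi hir hj hjr => h i j hi (by omega) hj (by omega)

lemma pvMinL_le_self (arr : List Int) {n : Int} (hn : 0 ≤ n) (r : Nat) : pvMinL arr n r ≤ r :=
  pvMinL_le arr n (pvValid_self arr hn r)

lemma pvMinL_mono (arr : List Int) (n : Int) {r' r : Nat} (h : r' ≤ r) :
    pvMinL arr n r' ≤ pvMinL arr n r :=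
  pvMinL_le arr n (pvValid_sub_right arr n (pvMinL_valid arr n r) h)

lemma pvIfMax (w b : Int) : (if w > b then w else b) = max b w := by
  by_cases h : w ≤ b <;> simp [max_def] <;> omega

-- ---- generic monotone-deque layer; instantiated with G i = arr[i] (min deque) and G i = -arr[i] (max deque)

def pvKeepB (G : Nat → Int) (k i : Nat) : Bool :=
  (List.range k).all fun j => decide (i < j → G i ≤ G j)

lemma pvKeepB_iff (G : Nat → Int) (k i : Nat) :
    pvKeepB G k i = true ↔ ∀ j, j < k → i < j → G i ≤ G j := by
  simp only [pvKeepB, List.all_eq_true, List.mem_range, decide_eq_true_eq]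

-- the deque contents for window [l, k): indices whose value is ≤ every later value in the window
def pvDq (G : Nat → Int) (l k : Nat) : List Nat :=
  (List.range' l (k - l)).filter (pvKeepB G k)

lemma pvMem_dq (G : Nat → Int) (l k i : Nat) :
    i ∈ pvDq G l k ↔ l ≤ i ∧ i < k ∧ ∀ j, j < k → i < j → G i ≤ G j := by
  simp only [pvDq, List.mem_filter, List.mem_range'_1, pvKeepB_iff]
  constructor
  · rintro ⟨⟨h1, h2⟩, h3⟩; exact ⟨h1, by omega, h3⟩
  · rintro ⟨h1, h2, h3⟩; exact ⟨⟨h1, by omega⟩, h3⟩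

lemma pvDq_pairwise_lt (G : Nat → Int) (l k : Nat) :
    List.Pairwise (· < ·) (pvDq G l k) :=
  List.Pairwise.filter _ (by simpa using List.pairwise_lt_range' (s := l) (n := k - l) 1)

lemma pvDq_pairwise_le (G : Nat → Int) (l k : Nat) :
    List.Pairwise (fun a b => G a ≤ G b) (pvDq G l k) := by
  refine List.Pairwise.imp_of_mem ?_ (pvDq_pairwise_lt G l k)
  intro a b ha hb hab
  have ha' := (pvMem_dq G l k a).1 ha
  have hb' := (pvMem_dq G l k b).1 hb
  exact ha'.2.2 b hb'.2.1 hab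

lemma pvK_mem_dq (G : Nat → Int) {l k : Nat} (h : l ≤ k) : k ∈ pvDq G l (k + 1) := by
  rw [pvMem_dq]; exact ⟨h, by omega, fun j hj hkj => by omega⟩

lemma pvPopRight_eq_filter (G : Nat → Int) (c : Int) :
    ∀ L : List Nat, List.Pairwise (fun a b => G a ≤ G b) L →
      pvPopRightWhile (fun i => decide (G i > c)) L = L.filter (fun i => decide (G i ≤ c)) := by
  intro L hL
  induction L with
  | nil => rfl
  | cons a t ih =>
    rw [List.pairwise_cons] at hL
    have ih' := ih hL.2
    by_cases hGa : G a ≤ c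
    · rw [pvPopRightWhile, ih']
      rcases h : t.filter (fun i => decide (G i ≤ c)) with _ | ⟨b, u⟩
      · simp [hGa, h, not_lt.2 hGa]
      · simp [hGa, h]
    · have hall : t.filter (fun i => decide (G i ≤ c)) = [] := by
        rw [List.filter_eq_nil_iff]
        intro b hb
        have := hL.1 b hb
        simp only [decide_eq_true_eq]; omega
      rw [pvPopRightWhile, ih', hall]
      simp [hGa, hall, show G a > c by omega]

-- the push step: pop-from-right then append turns the window-[l,k) deque into the window-[l,k+1) deque
lemma pvDq_step (G : Nat → Int) {l k : Nat} (hlk : l ≤ k) :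
    pvPopRightWhile (fun i => decide (G i > G k)) (pvDq G l k) ++ [k] = pvDq G l (k + 1) := by
  rw [pvPopRight_eq_filter G (G k) _ (pvDq_pairwise_le G l k)]
  have hkeepk : pvKeepB G (k + 1) k = true :=
    (pvKeepB_iff _ _ _).2 (fun j hj hkj => by omega)
  have hR : pvDq G l (k + 1) = (List.range' l (k - l)).filter (pvKeepB G (k + 1)) ++ [k] := by
    rw [pvDq, show k + 1 - l = (k - l) + 1 by omega, List.range'_1_concat,
      show l + (k - l) = k by omega, List.filter_append]
    congr 1
    simp [hkeepk]
  rw [hR]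
  congr 1
  rw [pvDq, List.filter_filter]
  refine (List.filter_congr ?_).symm
  intro i hi
  have hik : i < k := by rw [List.mem_range'_1] at hi; omega
  rw [Bool.eq_iff_iff, Bool.and_eq_true, decide_eq_true_eq, pvKeepB_iff, pvKeepB_iff]
  constructor
  · intro h; exact ⟨h k (by omega) hik, fun j hj hij => h j (by omega) hij⟩
  · rintro ⟨h1, h2⟩ j hj hij
    rcases Nat.lt_succ_iff_lt_or_eq.1 hj with hj' | hj'
    · exact h2 j hj' hij
    · subst hj'; exact h1

-- popping the front when it equals `l` turns the window-[l,k) deque into the window-[l+1,k) deque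
lemma pvDq_tail (G : Nat → Int) {l k : Nat} (hlk : l < k) :
    (if (pvDq G l k).head? = some l then (pvDq G l k).tail else pvDq G l k) = pvDq G (l + 1) k := by
  have hcons : pvDq G l k = (l :: List.range' (l + 1) (k - (l + 1))).filter (pvKeepB G k) := by
    rw [pvDq, show k - l = (k - (l + 1)) + 1 by omega, List.range'_succ]
  by_cases hl : pvKeepB G k l = true
  · have hdq : pvDq G l k = l :: pvDq G (l + 1) k := by
      rw [hcons, List.filter_cons, if_pos hl]; rfl
    rw [hdq]; simp
  · have hdq : pvDq G l k = pvDq G (l + 1) k := by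
      rw [hcons, List.filter_cons, if_neg hl]; rfl
    rw [hdq]
    have hnotl : ¬ (pvDq G (l + 1) k).head? = some l := by
      intro hh
      have hmem : l ∈ pvDq G (l + 1) k := List.mem_of_mem_head? (Option.mem_def.mpr hh)
      have := (pvMem_dq G (l + 1) k l).1 hmem
      omega
    rw [if_neg hnotl]

-- the front of the deque attains the minimum of G over the window [l..k]
lemma pvDq_head (G : Nat → Int) {l k : Nat} (hlk : l ≤ k) :
    ∃ h, (pvDq G l (k + 1)).head? = some h ∧ l ≤ h ∧ h ≤ k ∧
      ∀ j, l ≤ j → j ≤ k → G h ≤ G j := by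
  have key : ∀ d j, l ≤ j → j ≤ k → k - j ≤ d → ∃ i ∈ pvDq G l (k + 1), j ≤ i ∧ G i ≤ G j := by
    intro d
    induction d with
    | zero =>
      intro j hlj hjk hd
      have hjk' : j = k := by omega
      refine ⟨k, pvK_mem_dq G hlk, by omega, by rw [hjk']⟩
    | succ d ih =>
      intro j hlj hjk hd
      by_cases hkeep : ∀ j', j' < k + 1 → j < j' → G j ≤ G j'
      · exact ⟨j, (pvMem_dq G l (k + 1) j).2 ⟨hlj, by omega, hkeep⟩, le_refl _, le_refl _⟩
      · push Not at hkeep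
        obtain ⟨j', hj'1, hj'2, hj'3⟩ := hkeep
        obtain ⟨i, hi, hji, hGi⟩ := ih j' (by omega) (by omega) (by omega)
        exact ⟨i, hi, by omega, by omega⟩
  have hne : pvDq G l (k + 1) ≠ [] := List.ne_nil_of_mem (pvK_mem_dq G hlk)
  obtain ⟨h, t, ht⟩ := List.exists_cons_of_ne_nil hne
  have hmem : h ∈ pvDq G l (k + 1) := by rw [ht]; simp
  obtain ⟨hlh, hhk, hkeeph⟩ := (pvMem_dq G l (k + 1) h).1 hmem
  refine ⟨h, by rw [ht]; rfl, hlh, by omega, ?_⟩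
  intro j hlj hjk
  obtain ⟨i, hi, hji, hGi⟩ := key (k - j) j hlj hjk (le_refl _)
  have hhle : h ≤ i := by
    have hp := pvDq_pairwise_lt G l (k + 1)
    rw [ht, List.pairwise_cons] at hp
    rw [ht] at hi
    rcases List.mem_cons.1 hi with he | hm
    · omega
    · have := hp.1 i hm; omega
  have hhi : G h ≤ G i := by
    rcases Nat.eq_or_lt_of_le hhle with he | hlt'
    · rw [he]
    · have hi' := (pvMem_dq G l (k + 1) i).1 hi
      exact hkeeph i hi'.2.1 hlt'
  omega

-- ---- the shrink loop

lemma pvShrink_spec (arr : List Int) (n : Int) (hn : 0 ≤ n) (k : Nat) :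
    ∀ fuel l, l ≤ pvMinL arr n k → pvMinL arr n k - l < fuel →
      pvShrink arr n fuel (pvDq (fun i => arr.getD i 0) l (k + 1))
        (pvDq (fun i => -arr.getD i 0) l (k + 1)) l
      = (pvDq (fun i => arr.getD i 0) (pvMinL arr n k) (k + 1),
         pvDq (fun i => -arr.getD i 0) (pvMinL arr n k) (k + 1), pvMinL arr n k) := by
  intro fuel
  induction fuel with
  | zero => intro l h1 h2; omega
  | succ fuel ih =>
    intro l hlm hfuel
    have hmk : pvMinL arr n k ≤ k := pvMinL_le_self arr hn k
    have hlk : l ≤ k := by omega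
    obtain ⟨hm, hhm, hm1, hm2, hmin⟩ := pvDq_head (fun i => arr.getD i 0) hlk
    obtain ⟨hM, hhM, hM1, hM2, hmax'⟩ := pvDq_head (fun i => -arr.getD i 0) hlk
    have hmax : ∀ j, l ≤ j → j ≤ k → arr.getD j 0 ≤ arr.getD hM 0 := by
      intro j h1 h2; have := hmax' j h1 h2; simp only at this; omega
    rw [pvShrink, List.headD_eq_head?_getD, List.headD_eq_head?_getD, hhm, hhM]
    simp only [Option.getD_some]
    by_cases hc : arr.getD hM 0 - arr.getD hm 0 > n
    · rw [if_pos hc]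
      have hnv : ¬ pvValid arr n l k := by
        intro hv
        have h1 := hv hM hm hM1 hM2 hm1 hm2
        omega
      have hlm' : l < pvMinL arr n k := by
        rcases Nat.eq_or_lt_of_le hlm with he | h
        · exact absurd (he ▸ pvMinL_valid arr n k) hnv
        · exact h
      have e1 : (if some hm = some l then (pvDq (fun i => arr.getD i 0) l (k + 1)).tail
          else pvDq (fun i => arr.getD i 0) l (k + 1))
          = pvDq (fun i => arr.getD i 0) (l + 1) (k + 1) := by
        rw [← hhm]; exact pvDq_tail _ (show l < k + 1 by omega)
      have e2 : (if some hM = some l then (pvDq (fun i => -arr.getD i 0) l (k + 1)).tail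
          else pvDq (fun i => -arr.getD i 0) l (k + 1))
          = pvDq (fun i => -arr.getD i 0) (l + 1) (k + 1) := by
        rw [← hhM]; exact pvDq_tail _ (show l < k + 1 by omega)
      rw [e1, e2]
      exact ih (l + 1) (by omega) (by omega)
    · rw [if_neg hc]
      have hv : pvValid arr n l k := by
        intro i j hi hik hj hjk
        have h1 := hmax i hi hik
        have h2 := hmin j hj hjk
        simp only at h2
        omega
      have hlm'' : pvMinL arr n k = l := le_antisymm (pvMinL_le arr n hv) hlm
      rw [hlm'']

-- ---- the main loop invariant of A

def pvLft (arr : List Int) (n : Int) : Nat → Nat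
  | 0 => 0
  | k + 1 => pvMinL arr n k

def pvBestF (arr : List Int) (n : Int) (k : Nat) : Int :=
  (List.range k).foldl (fun b (r : Nat) => max b ((r : Int) - (pvMinL arr n r : Int) + 1)) 0

lemma pvLoop_inv (arr : List Int) (n : Int) (hn : 0 ≤ n) :
    ∀ k, (List.range k).foldl (pvStepA arr n) ([], [], 0, 0)
      = (pvDq (fun i => arr.getD i 0) (pvLft arr n k) k,
         pvDq (fun i => -arr.getD i 0) (pvLft arr n k) k, pvLft arr n k, pvBestF arr n k) := by
  intro k
  induction k with
  | zero => simp [pvDq, pvLft, pvBestF]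
  | succ k ih =>
    rw [List.range_succ, List.foldl_append, ih, List.foldl_cons, List.foldl_nil]
    have hlftk : pvLft arr n k ≤ k := by
      cases k with
      | zero => simp [pvLft]
      | succ k' =>
        simp only [pvLft]
        exact le_trans (pvMinL_le_self arr hn k') (by omega)
    have hlmono : pvLft arr n k ≤ pvMinL arr n k := by
      cases k with
      | zero => simp [pvLft]
      | succ k' => exact pvMinL_mono arr n (by omega)
    simp only [pvStepA]
    have e1 := pvDq_step (fun i => arr.getD i 0) hlftk
    have e2 : pvPopRightWhile (fun i => decide (arr.getD i 0 < arr.getD k 0))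
        (pvDq (fun i => -arr.getD i 0) (pvLft arr n k) k) ++ [k]
        = pvDq (fun i => -arr.getD i 0) (pvLft arr n k) (k + 1) := by
      have hpred : (fun i => decide (arr.getD i 0 < arr.getD k 0))
          = (fun i => decide ((fun i => -arr.getD i 0) i > (fun i => -arr.getD i 0) k)) := by
        funext i
        exact decide_eq_decide.mpr (by dsimp only; omega)
      rw [hpred]
      exact pvDq_step (fun i => -arr.getD i 0) hlftk
    rw [e1, e2, pvShrink_spec arr n hn k (k + 1) (pvLft arr n k) hlmono
      (by have := pvMinL_le_self arr hn k; omega)]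
    have hbf : pvBestF arr n (k + 1)
        = max (pvBestF arr n k) ((k : Int) - (pvMinL arr n k : Int) + 1) := by
      rw [pvBestF, pvBestF, List.range_succ, List.foldl_append, List.foldl_cons, List.foldl_nil]
    rw [hbf, ← pvIfMax]
    rfl

-- ---- B-side: running window min/max

def pvWinMin (arr : List Int) (l : Nat) : Nat → Int
  | 0 => arr.getD l 0
  | m + 1 => min (pvWinMin arr l m) (arr.getD (l + m + 1) 0)

def pvWinMax (arr : List Int) (l : Nat) : Nat → Int
  | 0 => arr.getD l 0
  | m + 1 => max (pvWinMax arr l m) (arr.getD (l + m + 1) 0)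

lemma pvWinMin_le (arr : List Int) (l : Nat) :
    ∀ m j, l ≤ j → j ≤ l + m → pvWinMin arr l m ≤ arr.getD j 0 := by
  intro m
  induction m with
  | zero => intro j h1 h2; have : j = l := by omega
            subst this; simp [pvWinMin]
  | succ m ih =>
    intro j h1 h2
    rw [pvWinMin]
    rcases Nat.lt_or_ge j (l + m + 1) with h | h
    · exact le_trans (min_le_left _ _) (ih j h1 (by omega))
    · have : j = l + m + 1 := by omega
      subst this; exact min_le_right _ _

lemma pvWinMin_mem (arr : List Int) (l : Nat) :
    ∀ m, ∃ j, l ≤ j ∧ j ≤ l + m ∧ pvWinMin arr l m = arr.getD j 0 := by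
  intro m
  induction m with
  | zero => exact ⟨l, le_refl _, by omega, rfl⟩
  | succ m ih =>
    obtain ⟨j, h1, h2, h3⟩ := ih
    rw [pvWinMin]
    rcases Int.le_total (pvWinMin arr l m) (arr.getD (l + m + 1) 0) with h | h
    · exact ⟨j, h1, by omega, by rw [min_eq_left h, h3]⟩
    · exact ⟨l + m + 1, by omega, by omega, by rw [min_eq_right h]⟩

lemma pvLe_winMax (arr : List Int) (l : Nat) :
    ∀ m j, l ≤ j → j ≤ l + m → arr.getD j 0 ≤ pvWinMax arr l m := by
  intro m
  induction m with
  | zero => intro j h1 h2; have : j = l := by omega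
            subst this; simp [pvWinMax]
  | succ m ih =>
    intro j h1 h2
    rw [pvWinMax]
    rcases Nat.lt_or_ge j (l + m + 1) with h | h
    · exact le_trans (ih j h1 (by omega)) (le_max_left _ _)
    · have : j = l + m + 1 := by omega
      subst this; exact le_max_right _ _

lemma pvWinMax_mem (arr : List Int) (l : Nat) :
    ∀ m, ∃ j, l ≤ j ∧ j ≤ l + m ∧ pvWinMax arr l m = arr.getD j 0 := by
  intro m
  induction m with
  | zero => exact ⟨l, le_refl _, by omega, rfl⟩
  | succ m ih =>
    obtain ⟨j, h1, h2, h3⟩ := ih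
    rw [pvWinMax]
    rcases Int.le_total (arr.getD (l + m + 1) 0) (pvWinMax arr l m) with h | h
    · exact ⟨j, h1, by omega, by rw [max_eq_left h, h3]⟩
    · exact ⟨l + m + 1, by omega, by omega, by rw [max_eq_right h]⟩

lemma pvRange_iff (arr : List Int) (n : Int) (l m : Nat) :
    pvWinMax arr l m - pvWinMin arr l m ≤ n ↔ pvValid arr n l (l + m) := by
  constructor
  · intro h i j hi hil hj hjl
    have h1 := pvLe_winMax arr l m i hi hil
    have h2 := pvWinMin_le arr l m j hj hjl
    omega
  · intro h
    obtain ⟨i0, hi1, hi2, hi3⟩ := pvWinMax_mem arr l m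
    obtain ⟨j0, hj1, hj2, hj3⟩ := pvWinMin_mem arr l m
    have := h i0 j0 hi1 hi2 hj1 hj2
    omega

lemma pvWin_upd_min (arr : List Int) (l r : Nat) (hlr : l ≤ r) :
    (if arr.getD r 0 < pvWinMin arr l (r - l - 1) then arr.getD r 0
      else pvWinMin arr l (r - l - 1)) = pvWinMin arr l (r - l) := by
  rcases Nat.eq_or_lt_of_le hlr with he | hlt
  · subst he; simp [pvWinMin]
  · rw [show r - l = (r - l - 1) + 1 by omega, pvWinMin,
      show l + (r - l - 1) + 1 = r by omega]
    by_cases h : arr.getD r 0 < pvWinMin arr l (r - l - 1) <;> simp [min_def] <;> omega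

lemma pvWin_upd_max (arr : List Int) (l r : Nat) (hlr : l ≤ r) :
    (if arr.getD r 0 > pvWinMax arr l (r - l - 1) then arr.getD r 0
      else pvWinMax arr l (r - l - 1)) = pvWinMax arr l (r - l) := by
  rcases Nat.eq_or_lt_of_le hlr with he | hlt
  · subst he; simp [pvWinMax]
  · rw [show r - l = (r - l - 1) + 1 by omega, pvWinMax,
      show l + (r - l - 1) + 1 = r by omega]
    by_cases h : arr.getD r 0 > pvWinMax arr l (r - l - 1) <;> simp [max_def] <;> omega

-- ---- pvInnerB lemmas

lemma pvInnerB_ge (arr : List Int) (n : Int) (l : Nat) :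
    ∀ fuel r cm cM best, arr.length - r ≤ fuel → best ≤ pvInnerB arr n l r cm cM best := by
  intro fuel
  induction fuel with
  | zero =>
    intro r cm cM best h
    rw [pvInnerB, dif_neg (by omega)]
  | succ fuel ih =>
    intro r cm cM best h
    rw [pvInnerB]
    by_cases hr : r < arr.length
    · rw [dif_pos hr]
      dsimp only
      by_cases hc : (if arr.getD r 0 > cM then arr.getD r 0 else cM)
          - (if arr.getD r 0 < cm then arr.getD r 0 else cm) ≤ n
      · rw [if_pos hc]
        have h2 := ih (r + 1) (if arr.getD r 0 < cm then arr.getD r 0 else cm)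
          (if arr.getD r 0 > cM then arr.getD r 0 else cM)
          (if (r : Int) - (l : Int) + 1 > best then (r : Int) - (l : Int) + 1 else best)
          (by omega)
        refine le_trans ?_ h2
        split <;> omega
      · rw [if_neg hc]
    · rw [dif_neg hr]

lemma pvInnerB_le (arr : List Int) (n : Int) (l : Nat) (U : Int)
    (H : ∀ r', l ≤ r' → r' < arr.length → pvValid arr n l r' → (r' : Int) - (l : Int) + 1 ≤ U) :
    ∀ fuel r best, arr.length - r ≤ fuel → l ≤ r → best ≤ U →
      pvInnerB arr n l r (pvWinMin arr l (r - l - 1)) (pvWinMax arr l (r - l - 1)) best ≤ U := by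
  intro fuel
  induction fuel with
  | zero =>
    intro r best h hlr hb
    rw [pvInnerB, dif_neg (by omega)]; exact hb
  | succ fuel ih =>
    intro r best h hlr hb
    rw [pvInnerB]
    by_cases hrL : r < arr.length
    · rw [dif_pos hrL]
      dsimp only
      rw [pvWin_upd_min arr l r hlr, pvWin_upd_max arr l r hlr]
      by_cases hc : pvWinMax arr l (r - l) - pvWinMin arr l (r - l) ≤ n
      · rw [if_pos hc]
        have hval : pvValid arr n l r := by
          have := (pvRange_iff arr n l (r - l)).1 hc
          rwa [show l + (r - l) = r by omega] at this
        have hb' : (if (r : Int) - (l : Int) + 1 > best then (r : Int) - (l : Int) + 1 else best) ≤ U := by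
          have := H r hlr hrL hval
          split <;> omega
        have hrec := ih (r + 1) _ (by omega) (by omega) hb'
        rwa [show r + 1 - l - 1 = r - l by omega] at hrec
      · rw [if_neg hc]; exact hb
    · rw [dif_neg hrL]; exact hb

lemma pvInnerB_reach (arr : List Int) (n : Int) (l t : Nat) (hlt : l ≤ t) (htL : t < arr.length)
    (hv : pvValid arr n l t) :
    ∀ fuel r best, t + 1 - r ≤ fuel → l ≤ r → r ≤ t →
      (t : Int) - (l : Int) + 1 ≤
        pvInnerB arr n l r (pvWinMin arr l (r - l - 1)) (pvWinMax arr l (r - l - 1)) best := by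
  intro fuel
  induction fuel with
  | zero => intro r best h h1 h2; omega
  | succ fuel ih =>
    intro r best hf hlr hrt
    have hrL : r < arr.length := by omega
    rw [pvInnerB, dif_pos hrL]
    dsimp only
    rw [pvWin_upd_min arr l r hlr, pvWin_upd_max arr l r hlr]
    have hc : pvWinMax arr l (r - l) - pvWinMin arr l (r - l) ≤ n := by
      rw [pvRange_iff, show l + (r - l) = r by omega]
      exact pvValid_sub_right arr n hv hrt
    rw [if_pos hc]
    rcases Nat.eq_or_lt_of_le hrt with he | hlt
    · subst he
      refine le_trans ?_ (pvInnerB_ge arr n l (arr.length) (r + 1) _ _ _ (by omega))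
      split <;> omega
    · have hrec := ih (r + 1) (if (r : Int) - (l : Int) + 1 > best then (r : Int) - (l : Int) + 1 else best)
        (by omega) (by omega) (by omega)
      rwa [show r + 1 - l - 1 = r - l by omega] at hrec

-- ---- fold helpers

lemma pvFoldl_preserve {α : Type} (P : Int → Prop) (f : Int → α → Int) :
    ∀ xs : List α, ∀ init, P init → (∀ b x, x ∈ xs → P b → P (f b x)) → P (xs.foldl f init) := by
  intro xs
  induction xs with
  | nil => intro init h _; exact h
  | cons a t ih =>
    intro init h hstep
    exact ih _ (hstep init a (by simp) h) (fun b x hx hb => hstep b x (by simp [hx]) hb)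

lemma pvLe_foldl_self {α : Type} (f : Int → α → Int) (hmono : ∀ b y, b ≤ f b y) :
    ∀ xs : List α, ∀ b, b ≤ xs.foldl f b := by
  intro xs
  induction xs with
  | nil => intro b; simp
  | cons a t ih => intro b; exact le_trans (hmono b a) (ih (f b a))

lemma pvFoldl_reach {α : Type} (f : Int → α → Int) (c : Int) (x : α)
    (hmono : ∀ b y, b ≤ f b y) (hx : ∀ b, c ≤ f b x) :
    ∀ xs : List α, ∀ init, x ∈ xs → c ≤ xs.foldl f init := by
  intro xs
  induction xs with
  | nil => intro init h; simp at h
  | cons a t ih =>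
    intro init h
    rcases List.mem_cons.1 h with h | h
    · subst h; exact le_trans (hx init) (pvLe_foldl_self f hmono t _)
    · exact ih _ h

lemma pvFoldl_max_attained {α : Type} (f : α → Int) :
    ∀ xs : List α, ∀ init : Int,
      xs.foldl (fun b x => max b (f x)) init = init ∨
        ∃ x ∈ xs, xs.foldl (fun b x => max b (f x)) init = f x := by
  intro xs
  induction xs with
  | nil => intro init; left; rfl
  | cons a t ih =>
    intro init
    rcases ih (max init (f a)) with h | ⟨x, hx, h⟩
    · simp only [List.foldl_cons] at *
      by_cases hc : f a ≤ init
      · left; rw [h]; omega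
      · right; exact ⟨a, by simp, by rw [h]; omega⟩
    · right; exact ⟨x, by simp [hx], by simpa using h⟩

-- ---- assembling the two sides

lemma pvA_eq (arr : List Int) (n : Int) (hn : 0 ≤ n) (harr : arr ≠ []) :
    longest_n_stable_subarray_length arr n = pvBestF arr n arr.length := by
  rw [longest_n_stable_subarray_length, if_neg (by omega), if_neg harr, pvLoop_inv arr n hn]

lemma pvB_eq (arr : List Int) (n : Int) (hn : 0 ≤ n) :
    longest_n_stable_subarray_length_alt arr n = pvBestF arr n arr.length := by
  have hFfold : pvBestF arr n arr.length = (List.range arr.length).foldl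
      (fun b (r : Nat) => max b ((r : Int) - (pvMinL arr n r : Int) + 1)) 0 := rfl
  have hF0 : (0 : Int) ≤ pvBestF arr n arr.length := by
    rw [hFfold]; exact pvLe_foldl_self _ (fun b y => le_max_left _ _) _ 0
  have hFel : ∀ r, r < arr.length → (r : Int) - (pvMinL arr n r : Int) + 1 ≤ pvBestF arr n arr.length := by
    intro r hr
    rw [hFfold]
    exact pvFoldl_reach (fun b (y : Nat) => max b ((y : Int) - (pvMinL arr n y : Int) + 1))
      ((r : Int) - (pvMinL arr n r : Int) + 1) r
      (fun b y => le_max_left _ _) (fun b => le_max_right _ _) _ 0 (List.mem_range.2 hr)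
  have hentry : ∀ l : Nat, pvWinMin arr l (l - l - 1) = arr.getD l 0 := by
    intro l; rw [show l - l - 1 = 0 by omega]; rfl
  have hentry' : ∀ l : Nat, pvWinMax arr l (l - l - 1) = arr.getD l 0 := by
    intro l; rw [show l - l - 1 = 0 by omega]; rfl
  apply le_antisymm
  · -- B ≤ F
    rw [longest_n_stable_subarray_length_alt]
    refine pvFoldl_preserve (fun b => b ≤ pvBestF arr n arr.length) _ (List.range arr.length) 0 hF0 ?_
    intro b l hl hb
    have hlL : l < arr.length := List.mem_range.1 hl
    have H : ∀ r', l ≤ r' → r' < arr.length → pvValid arr n l r' →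
        (r' : Int) - (l : Int) + 1 ≤ pvBestF arr n arr.length := by
      intro r' h1 h2 h3
      have hml : pvMinL arr n r' ≤ l := pvMinL_le arr n h3
      have h4 := hFel r' h2
      have h5 : (pvMinL arr n r' : Int) ≤ (l : Int) := by exact_mod_cast hml
      omega
    have := pvInnerB_le arr n l (pvBestF arr n arr.length) H (arr.length - l) l b (by omega)
      (le_refl l) hb
    rwa [hentry l, hentry' l] at this
  · -- F ≤ B
    rw [hFfold]
    rcases pvFoldl_max_attained (fun r : Nat => (r : Int) - (pvMinL arr n r : Int) + 1)
        (List.range arr.length) 0 with h | ⟨r, hr, h⟩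
    · rw [h, longest_n_stable_subarray_length_alt]
      exact pvFoldl_preserve (fun b => (0 : Int) ≤ b) _ _ 0 (le_refl _)
        (fun b x hx hb => le_trans hb (pvInnerB_ge arr n x (arr.length) x _ _ _ (by omega)))
    · rw [h]
      have hrL : r < arr.length := List.mem_range.1 hr
      have hlr : pvMinL arr n r ≤ r := pvMinL_le_self arr hn r
      rw [longest_n_stable_subarray_length_alt]
      refine pvFoldl_reach _ _ (pvMinL arr n r)
        (fun b y => pvInnerB_ge arr n y (arr.length) y _ _ b (by omega)) ?_ _ 0
        (List.mem_range.2 (by omega))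
      intro b
      have := pvInnerB_reach arr n (pvMinL arr n r) r hlr hrL (pvMinL_valid arr n r)
        (r + 1 - pvMinL arr n r) (pvMinL arr n r) b (by omega) (le_refl _) hlr
      rwa [hentry (pvMinL arr n r), hentry' (pvMinL arr n r)] at this

lemma pvInnerB_neg (arr : List Int) (n : Int) (hn : n < 0) (l : Nat) (c best : Int) :
    pvInnerB arr n l l c c best = best := by
  rw [pvInnerB]
  by_cases hr : l < arr.length
  · rw [dif_pos hr]
    dsimp only
    have hcond : ¬ ((if arr.getD l 0 > c then arr.getD l 0 else c)
        - (if arr.getD l 0 < c then arr.getD l 0 else c) ≤ n) := by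
      intro hle
      rcases lt_trichotomy (arr.getD l 0) c with h | h | h
      · rw [if_neg (by omega), if_pos h] at hle; omega
      · rw [if_neg (by omega), if_neg (by omega)] at hle; omega
      · rw [if_pos h, if_neg (by omega)] at hle; omega
    rw [if_neg hcond]
  · rw [dif_neg hr]

-- ===== VERDICT (by name: the statement is the Claim_ definition above) =====
theorem longest_n_stable_subarray_length_spec : Claim_equal_longest_n_stable_subarray_length := by
  intro arr n _
  unfold Spec_longest_n_stable_subarray_length
  by_cases hn : n < 0
  · rw [longest_n_stable_subarray_length, if_pos hn]
    rw [longest_n_stable_subarray_length_alt]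
    exact (pvFoldl_preserve (fun b => b = (0 : Int)) _ (List.range arr.length) 0 rfl
      (fun b x hx hb => by rw [hb, pvInnerB_neg arr n hn])).symm
  · by_cases harr : arr = []
    · subst harr
      rw [longest_n_stable_subarray_length, longest_n_stable_subarray_length_alt]
      split <;> simp
    · rw [pvA_eq arr n (by omega) harr, pvB_eq arr n (by omega)]
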